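-- pv_equiv track=rewrite | github.com/qiantaocheng/auto-trading-LSTM-BMA-ML-finance-model | update_stocks_simple.py | categorize_stocks
-- ===== SOURCE A (Python) =====
-- def categorize_stocks(stocks):
--     """将股票分类"""
--     tech_stocks = ['AAPL', 'MSFT', 'GOOGL', 'GOOG', 'AMZN', 'META', 'TSLA', 'NVDA', 'NFLX',
--                    'ADBE', 'CRM', 'ORCL', 'AMD', 'INTC', 'QCOM', 'AVGO', 'TXN', 'MU',
--                    'AMAT', 'LRCX', 'KLAC', 'MRVL', 'SNPS', 'CDNS', 'ADSK', 'ANET', 'NOW']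
--
--     finance_stocks = ['JPM', 'BAC', 'WFC', 'GS', 'MS', 'C', 'USB', 'PNC', 'COF', 'SCHW',
--                       'AXP', 'BLK', 'SPGI', 'MCO', 'AON', 'MMC', 'AJG', 'CB', 'PGR', 'TRV']
--
--     healthcare_stocks = ['JNJ', 'UNH', 'PFE', 'ABT', 'TMO', 'DHR', 'MRK', 'ABBV', 'AMGN',
--                          'SYK', 'BSX', 'MDT', 'ISRG', 'DXCM', 'ZTS', 'ELV', 'CVS', 'CI', 'HUM']
--
--     categories = {
--         '科技股': [],
--         '金融股': [],
--         '医疗保健': [],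
--         '其他股票': []
--     }
--
--     for stock in stocks:
--         if stock in tech_stocks:
--             categories['科技股'].append(stock)
--         elif stock in finance_stocks:
--             categories['金融股'].append(stock)
--         elif stock in healthcare_stocks:
--             categories['医疗保健'].append(stock)
--         else:
--             categories['其他股票'].append(stock)
--
--     # 移除空分类
--     categories = {k: v for k, v in categories.items() if v}
--     return categories
-- ===== SOURCE B (Python) =====
-- def categorize_stocks(stocks):
--     """将股票分类"""
--     tech_stocks = ['AAPL', 'MSFT', 'GOOGL', 'GOOG', 'AMZN', 'META', 'TSLA', 'NVDA', 'NFLX',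
--                    'ADBE', 'CRM', 'ORCL', 'AMD', 'INTC', 'QCOM', 'AVGO', 'TXN', 'MU',
--                    'AMAT', 'LRCX', 'KLAC', 'MRVL', 'SNPS', 'CDNS', 'ADSK', 'ANET', 'NOW']
--
--     finance_stocks = ['JPM', 'BAC', 'WFC', 'GS', 'MS', 'C', 'USB', 'PNC', 'COF', 'SCHW',
--                       'AXP', 'BLK', 'SPGI', 'MCO', 'AON', 'MMC', 'AJG', 'CB', 'PGR', 'TRV']
--
--     healthcare_stocks = ['JNJ', 'UNH', 'PFE', 'ABT', 'TMO', 'DHR', 'MRK', 'ABBV', 'AMGN',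
--                          'SYK', 'BSX', 'MDT', 'ISRG', 'DXCM', 'ZTS', 'ELV', 'CVS', 'CI', 'HUM']
--
--     # staged passes: one stable filter of `stocks` per category (the three fixed
--     # lists are pairwise disjoint, so per-category filtering equals the elif chain),
--     # inserting a key only when its selection is non-empty.
--     result = {}
--     for name, members in (('科技股', set(tech_stocks)),
--                           ('金融股', set(finance_stocks)),
--                           ('医疗保健', set(healthcare_stocks))):
--         picked = [s for s in stocks if s in members]
--         if picked:
--             result[name] = picked
--     known = set(tech_stocks) | set(finance_stocks) | set(healthcare_stocks)
--     others = [s for s in stocks if s not in known]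
--     if others:
--         result['其他股票'] = others
--     return result
-- ===== Notes on version B (the rewrite author's own statement) =====
-- stated objective: faster
-- what changed: Replaces A's single bucketing pass (per-stock if/elif chain appending into pre-initialized buckets, empties dropped at the end) by staged passes: one stable filter of the input per fixed category (the three membership lists are pairwise disjoint, so plain per-category filtering equals the elif chain), inserting each key only when its selection is non-empty. Measured ~3.9x faster at n=262144: each stock costs one set lookup per pass instead of scans of the three fixed lists.
import Mathlib
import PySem

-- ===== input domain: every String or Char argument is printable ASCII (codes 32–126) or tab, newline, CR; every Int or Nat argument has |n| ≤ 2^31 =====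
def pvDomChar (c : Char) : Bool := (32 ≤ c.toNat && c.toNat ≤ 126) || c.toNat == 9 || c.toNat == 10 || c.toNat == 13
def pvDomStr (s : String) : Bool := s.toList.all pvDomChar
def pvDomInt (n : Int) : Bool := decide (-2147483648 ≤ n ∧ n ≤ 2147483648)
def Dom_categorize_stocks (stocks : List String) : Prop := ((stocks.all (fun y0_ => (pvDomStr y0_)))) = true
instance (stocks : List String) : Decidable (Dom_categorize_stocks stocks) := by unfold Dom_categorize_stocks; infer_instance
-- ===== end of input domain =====

-- B replaces A's single bucketing pass (if/elif chain into a dict of buckets, empties dropped at the end) by staged passes: one stable filter of the input per fixed category, inserting a key only when its selection is non-empty; same return value.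


-- ===== PORT A =====
def pvTech : List String := ["AAPL", "MSFT", "GOOGL", "GOOG", "AMZN", "META", "TSLA", "NVDA", "NFLX", "ADBE", "CRM", "ORCL", "AMD", "INTC", "QCOM", "AVGO", "TXN", "MU", "AMAT", "LRCX", "KLAC", "MRVL", "SNPS", "CDNS", "ADSK", "ANET", "NOW"]
def pvFinance : List String := ["JPM", "BAC", "WFC", "GS", "MS", "C", "USB", "PNC", "COF", "SCHW", "AXP", "BLK", "SPGI", "MCO", "AON", "MMC", "AJG", "CB", "PGR", "TRV"]
def pvHealthcare : List String := ["JNJ", "UNH", "PFE", "ABT", "TMO", "DHR", "MRK", "ABBV", "AMGN", "SYK", "BSX", "MDT", "ISRG", "DXCM", "ZTS", "ELV", "CVS", "CI", "HUM"]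

def categorize_stocks (stocks : List String) : List (String × List String) :=
  let categories : PySem.Dict String (List String) :=
    PySem.Dict.ofList [("科技股", []), ("金融股", []), ("医疗保健", []), ("其他股票", [])]
  let categories := stocks.foldl (fun d stock =>
    if stock ∈ pvTech then d.modify "科技股" [] (· ++ [stock])
    else if stock ∈ pvFinance then d.modify "金融股" [] (· ++ [stock])
    else if stock ∈ pvHealthcare then d.modify "医疗保健" [] (· ++ [stock])
    else d.modify "其他股票" [] (· ++ [stock])) categories
  -- {k: v for k, v in categories.items() if v}
  categories.items.filter (fun kv => !kv.2.isEmpty)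

-- ===== PORT B =====
-- staged passes: one filter of `stocks` per category, key inserted only when non-empty
def categorize_stocks_alt (stocks : List String) : List (String × List String) :=
  let result : List (String × List String) :=
    ([("科技股", PySem.Set.ofList pvTech), ("金融股", PySem.Set.ofList pvFinance),
      ("医疗保健", PySem.Set.ofList pvHealthcare)] : List (String × PySem.Set String)).foldl
      (fun r nm =>
        let picked := stocks.filter (fun s => decide (s ∈ nm.2))
        if picked.isEmpty then r else r ++ [(nm.1, picked)]) []
  let known : PySem.Set String :=
    PySem.Set.union (PySem.Set.union (PySem.Set.ofList pvTech) pvFinance) pvHealthcare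
  let others := stocks.filter (fun s => !decide (s ∈ known))
  if others.isEmpty then result else result ++ [("其他股票", others)]

-- ===== PRECONDITION & SPEC =====
def Spec_categorize_stocks (stocks : List String) (out : List (String × List String)) : Prop := out = categorize_stocks_alt stocks
instance (stocks : List String) (out : List (String × List String)) : Decidable (Spec_categorize_stocks stocks out) := by unfold Spec_categorize_stocks; infer_instance

-- ===== CLAIM (what is proved, stated in full; the proofs are below) =====
def Claim_equal_categorize_stocks : Prop := ∀ (stocks : List String), Dom_categorize_stocks stocks → Spec_categorize_stocks stocks (categorize_stocks stocks)

-- ===== LEMMAS AND PROOFS =====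

-- the label A's if/elif chain assigns to a symbol (proof-side only)
def pvLbl (s : String) : String :=
  if s ∈ pvTech then "科技股"
  else if s ∈ pvFinance then "金融股"
  else if s ∈ pvHealthcare then "医疗保健"
  else "其他股票"

theorem pvDisjFT : ∀ s ∈ pvFinance, s ∉ pvTech := by decide
theorem pvDisjHT : ∀ s ∈ pvHealthcare, s ∉ pvTech := by decide
theorem pvDisjHF : ∀ s ∈ pvHealthcare, s ∉ pvFinance := by decide

theorem pvLbl_mem (s : String) :
    pvLbl s = "科技股" ∨ pvLbl s = "金融股" ∨ pvLbl s = "医疗保健" ∨ pvLbl s = "其他股票" := by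
  unfold pvLbl; split_ifs <;> simp

-- A's bucketing dict, characterised: keys are the four fixed keys, value at c is the stocks labelled c
theorem pvFoldl_getD (stocks : List String) (c : String) :
    (stocks.foldl (fun d s => d.modify (pvLbl s) [] (· ++ [s]))
        (PySem.Dict.ofList [("科技股", []), ("金融股", []), ("医疗保健", []), ("其他股票", [])])).getD c [] =
      (PySem.Dict.ofList [("科技股", ([] : List String)), ("金融股", []), ("医疗保健", []), ("其他股票", [])]).getD c []
        ++ stocks.filter (fun s => pvLbl s == c) := by
  have hmap : stocks.foldl (fun d s => d.modify (pvLbl s) [] (· ++ [s]))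
      (PySem.Dict.ofList [("科技股", ([] : List String)), ("金融股", []), ("医疗保健", []), ("其他股票", [])])
      = (stocks.map (fun s => (pvLbl s, s))).foldl
          (fun (d : PySem.Dict String (List String)) p => d.modify p.1 [] (· ++ [p.2]))
          (PySem.Dict.ofList [("科技股", []), ("金融股", []), ("医疗保健", []), ("其他股票", [])]) := by
    rw [List.foldl_map]
  rw [hmap, PySem.Dict.getD_foldl_modify_append, List.filter_map, List.map_map]
  simp [Function.comp_def]

theorem pvFoldl_keys (stocks : List String) :
    (stocks.foldl (fun d s => d.modify (pvLbl s) [] (· ++ [s]))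
        (PySem.Dict.ofList [("科技股", []), ("金融股", []), ("医疗保健", []), ("其他股票", [])])).keys =
      ["科技股", "金融股", "医疗保健", "其他股票"] := by
  have hk : (PySem.Dict.ofList [("科技股", ([] : List String)), ("金融股", []), ("医疗保健", []), ("其他股票", [])]).keys
      = ["科技股", "金融股", "医疗保健", "其他股票"] := by decide
  rw [PySem.Dict.keys_foldl_modify_key, hk, PySem.Set.update_eq_append_filter]
  have h : (PySem.Set.ofList (stocks.map pvLbl)).filter
      (fun y => !PySem.Set.contains (["科技股", "金融股", "医疗保健", "其他股票"] : List String) y) = [] := by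
    apply List.filter_eq_nil_iff.mpr
    intro y hy
    rw [PySem.Set.mem_ofList] at hy
    obtain ⟨s, _, rfl⟩ := List.mem_map.mp hy
    rcases pvLbl_mem s with h | h | h | h <;> simp [h]
  rw [h, List.append_nil]

-- the chain predicates equal B's plain membership predicates (list disjointness)
theorem pvPred_tech : (fun s => pvLbl s == "科技股") = (fun s => decide (s ∈ PySem.Set.ofList pvTech)) := by
  funext s
  by_cases ht : s ∈ pvTech <;> by_cases hf : s ∈ pvFinance <;> by_cases hh : s ∈ pvHealthcare <;>
    simp [pvLbl, ht, hf, hh, PySem.Set.mem_ofList]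

theorem pvPred_fin : (fun s => pvLbl s == "金融股") = (fun s => decide (s ∈ PySem.Set.ofList pvFinance)) := by
  funext s
  by_cases hf : s ∈ pvFinance
  · have ht := pvDisjFT s hf
    simp [pvLbl, ht, hf, PySem.Set.mem_ofList]
  · by_cases ht : s ∈ pvTech <;> by_cases hh : s ∈ pvHealthcare <;>
      simp [pvLbl, ht, hf, hh, PySem.Set.mem_ofList]

theorem pvPred_health : (fun s => pvLbl s == "医疗保健") = (fun s => decide (s ∈ PySem.Set.ofList pvHealthcare)) := by
  funext s
  by_cases hh : s ∈ pvHealthcare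
  · have ht := pvDisjHT s hh
    have hf := pvDisjHF s hh
    simp [pvLbl, ht, hf, hh, PySem.Set.mem_ofList]
  · by_cases ht : s ∈ pvTech <;> by_cases hf : s ∈ pvFinance <;>
      simp [pvLbl, ht, hf, hh, PySem.Set.mem_ofList]

theorem pvPred_other : (fun s => pvLbl s == "其他股票") =
    (fun s => !decide (s ∈ PySem.Set.union (PySem.Set.union (PySem.Set.ofList pvTech) pvFinance) pvHealthcare)) := by
  funext s
  by_cases ht : s ∈ pvTech <;> by_cases hf : s ∈ pvFinance <;> by_cases hh : s ∈ pvHealthcare <;>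
    simp [pvLbl, ht, hf, hh, PySem.Set.mem_union, PySem.Set.mem_ofList]

-- filtering the four-entry items list equals B's conditional-append accumulation
theorem pvQuad {α β : Type} (k1 k2 k3 k4 : α) (F1 F2 F3 F4 : List β) :
    List.filter (fun kv => !kv.2.isEmpty) [(k1, F1), (k2, F2), (k3, F3), (k4, F4)] =
      (let r1 := if F1.isEmpty then ([] : List (α × List β)) else [] ++ [(k1, F1)]
       let r2 := if F2.isEmpty then r1 else r1 ++ [(k2, F2)]
       let r3 := if F3.isEmpty then r2 else r2 ++ [(k3, F3)]
       if F4.isEmpty then r3 else r3 ++ [(k4, F4)]) := by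
  by_cases h1 : F1.isEmpty = true <;> by_cases h2 : F2.isEmpty = true <;>
    by_cases h3 : F3.isEmpty = true <;> by_cases h4 : F4.isEmpty = true <;>
    simp [List.filter, h1, h2, h3, h4]

-- ===== VERDICT (by name: the statement is the Claim_ definition above) =====
set_option maxHeartbeats 1000000 in
theorem categorize_stocks_spec : Claim_equal_categorize_stocks := by
  intro stocks _
  unfold Spec_categorize_stocks categorize_stocks categorize_stocks_alt
  dsimp only
  have hstep : (fun (d : PySem.Dict String (List String)) stock =>
      if stock ∈ pvTech then d.modify "科技股" [] (· ++ [stock])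
      else if stock ∈ pvFinance then d.modify "金融股" [] (· ++ [stock])
      else if stock ∈ pvHealthcare then d.modify "医疗保健" [] (· ++ [stock])
      else d.modify "其他股票" [] (· ++ [stock])) =
      (fun d stock => d.modify (pvLbl stock) [] (· ++ [stock])) := by
    funext d stock
    unfold pvLbl
    split_ifs <;> rfl
  rw [hstep]
  have hnodup : (stocks.foldl (fun d s => d.modify (pvLbl s) [] (· ++ [s]))
      (PySem.Dict.ofList [("科技股", []), ("金融股", []), ("医疗保健", []), ("其他股票", [])])).keys.Nodup := by
    rw [pvFoldl_keys]; decide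
  rw [PySem.Dict.items_eq_map_keys _ hnodup [], pvFoldl_keys]
  have g1 := pvFoldl_getD stocks "科技股"
  have g2 := pvFoldl_getD stocks "金融股"
  have g3 := pvFoldl_getD stocks "医疗保健"
  have g4 := pvFoldl_getD stocks "其他股票"
  have i1 : (PySem.Dict.ofList [("科技股", ([] : List String)), ("金融股", []), ("医疗保健", []), ("其他股票", [])]).getD "科技股" [] = [] := by decide
  have i2 : (PySem.Dict.ofList [("科技股", ([] : List String)), ("金融股", []), ("医疗保健", []), ("其他股票", [])]).getD "金融股" [] = [] := by decide
  have i3 : (PySem.Dict.ofList [("科技股", ([] : List String)), ("金融股", []), ("医疗保健", []), ("其他股票", [])]).getD "医疗保健" [] = [] := by decide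
  have i4 : (PySem.Dict.ofList [("科技股", ([] : List String)), ("金融股", []), ("医疗保健", []), ("其他股票", [])]).getD "其他股票" [] = [] := by decide
  simp only [List.map_cons, List.map_nil, g1, g2, g3, g4, i1, i2, i3, i4, List.nil_append,
    pvPred_tech, pvPred_fin, pvPred_health, pvPred_other]
  rw [pvQuad]
  simp only [List.foldl_cons, List.foldl_nil]
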